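-- pv_equiv track=rewrite | github.com/Sajotim/SRE_2019_winter_post | 爱国/尧显淳/hyzy.py | setdomain
-- ===== SOURCE A (Python) =====
-- def setdomain(hz):
--     a = list(map(chr, range(ord('a'), ord('z') + 1)))
--     words = ['', '']
--     sum = []
--     i = 0
--     k = 0
--     while i < 26:
--         words[0] = a[i]
--         i += 1
--         k = 0
--         while k < 26:
--             words[1] = a[k]
--             k += 1
--             s = 'a'+''.join(words) + 'b' + hz    # 这里组合成域名。
--             sum.append(s)
--     return sum
-- ===== SOURCE B (Python) =====
-- def setdomain(hz):
--     return ['a' + chr(97 + n // 26) + chr(97 + n % 26) + 'b' + hz for n in range(676)]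
-- ===== Notes on version B (the rewrite author's own statement) =====
-- stated objective: simpler
-- what changed: Replaces the two nested while-loops with mutable words/index state by a single comprehension over range(676), recovering the two letters by divmod (n//26, n%26).
import Mathlib
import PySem

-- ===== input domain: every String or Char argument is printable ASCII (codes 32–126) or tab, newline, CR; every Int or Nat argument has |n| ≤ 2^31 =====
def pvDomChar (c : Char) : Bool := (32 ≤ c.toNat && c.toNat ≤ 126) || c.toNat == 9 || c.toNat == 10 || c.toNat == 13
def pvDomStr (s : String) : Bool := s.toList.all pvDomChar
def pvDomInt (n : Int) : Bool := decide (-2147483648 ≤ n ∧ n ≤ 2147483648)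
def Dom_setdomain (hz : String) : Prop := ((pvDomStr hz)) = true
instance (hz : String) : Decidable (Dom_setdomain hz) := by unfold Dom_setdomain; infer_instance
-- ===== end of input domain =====

-- B replaces A's two nested while-loops over a mutable two-cell `words` list by a single
-- comprehension over range(676), recovering the two letters as n // 26 and n % 26 (simpler).

-- ===== PORT A =====
def setdomain (hz : String) : List String :=
  let a : List String := (PySem.List.pyRange 97 123 1).map (fun n => String.ofList [Char.ofNat n.toNat])
  (PySem.List.pyRange 0 26 1).foldl (fun sum i =>
    let w0 := PySem.List.pyGetD a i ""          -- words[0] = a[i]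
    (PySem.List.pyRange 0 26 1).foldl (fun sum k =>
      let w1 := PySem.List.pyGetD a k ""        -- words[1] = a[k]
      sum ++ ["a" ++ PySem.Str.join "" [w0, w1] ++ "b" ++ hz]) sum) []

-- ===== PORT B =====
def setdomain_alt (hz : String) : List String :=
  (PySem.List.pyRange 0 676 1).map (fun n =>
    "a" ++ String.ofList [Char.ofNat (97 + PySem.Int.floordiv n 26).toNat]
        ++ String.ofList [Char.ofNat (97 + PySem.Int.mod n 26).toNat] ++ "b" ++ hz)

-- ===== PRECONDITION & SPEC =====
def Spec_setdomain (hz : String) (out : List String) : Prop := out = setdomain_alt hz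
instance (hz : String) (out : List String) : Decidable (Spec_setdomain hz out) := by unfold Spec_setdomain; infer_instance

-- ===== CLAIM (what is proved, stated in full; the proofs are below) =====
def Claim_equal_setdomain : Prop := ∀ (hz : String), Dom_setdomain hz → Spec_setdomain hz (setdomain hz)

-- ===== LEMMAS AND PROOFS =====

-- range(m*n) traversed as m blocks of n (the flat index split i-major)
theorem range_mul_flatMap {β : Type} (g : Nat → β) (m n : Nat) :
    (List.range (m * n)).map g
      = (List.range m).flatMap (fun i => (List.range n).map (fun k => g (i * n + k))) := by
  induction m with
  | zero => simp
  | succ m ih =>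
    rw [Nat.succ_mul, List.range_add, List.map_append, ih, List.range_succ,
        List.flatMap_append]
    simp [List.map_map, Function.comp, Nat.add_comm]

theorem setdomain_eq_alt (hz : String) : setdomain hz = setdomain_alt hz := by
  unfold setdomain setdomain_alt
  simp only [PySem.List.foldl_append_singleton_eq_map, PySem.List.foldl_append_eq_flatMap,
    List.nil_append]
  rw [PySem.List.pyRange_one 0 676, List.map_map,
      show ((676:Int) - 0).toNat = 26 * 26 from by decide,
      range_mul_flatMap _ 26 26,
      PySem.List.pyRange_one 0 26]
  simp only [show ((26:Int)-0).toNat = 26 from rfl, zero_add, List.flatMap_map,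
    List.map_map, Function.comp]
  apply List.flatMap_congr
  intro i hi
  apply List.map_congr_left
  intro k hk
  rw [List.mem_range] at hi hk
  simp only [Function.comp_apply]
  rw [PySem.List.pyGetD_map_pyRange_one _ 97 123 i "" (by omega),
      PySem.List.pyGetD_map_pyRange_one _ 97 123 k "" (by omega)]
  rw [show ((26:Int)) = ((26:Nat):Int) from rfl,
      PySem.Int.floordiv_natCast, PySem.Int.mod_natCast,
      show (i*26+k)/26 = i from by omega, show (i*26+k)%26 = k from by omega,
      show ((97:Int) + (i:Int)).toNat = 97+i from by omega,
      show ((97:Int) + (k:Int)).toNat = 97+k from by omega]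
  simp [PySem.Str.join, PySem.Chars.join, List.intercalate, String.append_assoc]
  apply String.ext
  simp

-- ===== VERDICT (by name: the statement is the Claim_ definition above) =====
theorem setdomain_spec : Claim_equal_setdomain := by
  intro hz _
  unfold Spec_setdomain
  exact setdomain_eq_alt hz
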